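-- pv_equiv track=rewrite | github.com/mikedasquirrel/namesake | scripts/ai_name_generator.py | _is_pronounceable
-- ===== SOURCE A (Python) =====
-- def _is_pronounceable(name: str) -> bool:
--     """Check if name is pronounceable (no 3+ consonants in a row)."""
--     consonant_run = 0
--
--     for char in name.lower():
--         if char in 'aeiouy':
--             consonant_run = 0
--         else:
--             consonant_run += 1
--             if consonant_run >= 3:
--                 return False
--
--     return True
-- ===== SOURCE B (Python) =====
-- def _is_pronounceable(name: str) -> bool:
--     """Check if name is pronounceable (no 3+ consonants in a row)."""
--     mask = [c not in 'aeiouy' for c in name.lower()]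
--     return not any(mask[i] and mask[i + 1] and mask[i + 2]
--                    for i in range(len(mask) - 2))
-- ===== Notes on version B (the rewrite author's own statement) =====
-- stated objective: alternative
-- what changed: replaced the running consonant-counter with early return by a precomputed consonant mask scanned over sliding windows of three
import Mathlib
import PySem

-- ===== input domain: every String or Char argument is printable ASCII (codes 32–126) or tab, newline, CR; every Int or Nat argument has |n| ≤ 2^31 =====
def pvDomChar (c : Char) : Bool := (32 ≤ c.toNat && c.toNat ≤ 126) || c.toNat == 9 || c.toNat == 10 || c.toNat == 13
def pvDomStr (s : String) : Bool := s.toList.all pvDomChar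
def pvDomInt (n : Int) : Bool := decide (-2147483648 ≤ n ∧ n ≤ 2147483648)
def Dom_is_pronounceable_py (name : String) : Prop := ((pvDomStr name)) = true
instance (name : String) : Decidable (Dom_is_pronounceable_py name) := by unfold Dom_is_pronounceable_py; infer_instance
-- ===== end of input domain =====

-- B replaces A's running consonant-counter with a precomputed consonant mask scanned over sliding windows of three (alternative decomposition, same cost).

-- ===== PORT A =====
def pvVowel (c : Char) : Bool := ['a', 'e', 'i', 'o', 'u', 'y'].contains c

-- the 'for char in name.lower(): …' loop with early 'return False', state = consonant_run
def pvGoA : List Char → Nat → Bool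
  | [], _ => true
  | c :: rest, run =>
    if pvVowel c then pvGoA rest 0
    else if run + 1 ≥ 3 then false
    else pvGoA rest (run + 1)

def is_pronounceable_py (name : String) : Bool :=
  pvGoA (PySem.Chars.lower name.toList) 0

-- ===== PORT B =====
-- 'any(mask[i] and mask[i+1] and mask[i+2] for i in range(len(mask)-2))', negated, as a walk over the windows
def pvGoB : List Bool → Bool
  | b1 :: b2 :: b3 :: rest => if b1 && b2 && b3 then false else pvGoB (b2 :: b3 :: rest)
  | _ => true

def is_pronounceable_py_alt (name : String) : Bool :=
  pvGoB ((PySem.Chars.lower name.toList).map (fun c => !pvVowel c))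

-- ===== PRECONDITION & SPEC =====
def Spec_is_pronounceable_py (name : String) (out : Bool) : Prop := out = is_pronounceable_py_alt name
instance (name : String) (out : Bool) : Decidable (Spec_is_pronounceable_py name out) := by unfold Spec_is_pronounceable_py; infer_instance

-- ===== CLAIM (what is proved, stated in full; the proofs are below) =====
def Claim_equal_is_pronounceable_py : Prop := ∀ (name : String), Dom_is_pronounceable_py name → Spec_is_pronounceable_py name (is_pronounceable_py name)

-- ===== LEMMAS AND PROOFS =====

-- a window containing a vowel (false in the mask) can never fire, so pvGoB skips past it
lemma pvGoB_skip0 (m : List Bool) : pvGoB (false :: m) = pvGoB m := by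
  rcases m with _ | ⟨a, _ | ⟨b, t⟩⟩ <;> simp [pvGoB]

lemma pvGoB_skip1 (m : List Bool) : pvGoB (true :: false :: m) = pvGoB m := by
  rcases m with _ | ⟨a, t⟩ <;> simp [pvGoB, pvGoB_skip0]

lemma pvGoB_skip2 (m : List Bool) : pvGoB (true :: true :: false :: m) = pvGoB m := by
  simp [pvGoB, pvGoB_skip1]

-- loop invariant: A's counter `run` is the number of consonants pvGoB still has pending before `l`
lemma pvGoA_eq_pvGoB (l : List Char) : ∀ run : Nat, run ≤ 2 →
    pvGoA l run = pvGoB (List.replicate run true ++ l.map (fun c => !pvVowel c)) := by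
  induction l with
  | nil =>
    intro run hrun
    interval_cases run <;> decide
  | cons c rest ih =>
    intro run hrun
    by_cases hv : pvVowel c
    · have : pvGoA (c :: rest) run = pvGoA rest 0 := by simp [pvGoA, hv]
      rw [this, ih 0 (by omega)]
      interval_cases run <;>
        simp [hv, pvGoB_skip0, pvGoB_skip1, pvGoB_skip2]
    · by_cases h2 : run = 2
      · subst h2
        simp [pvGoA, hv, pvGoB]
      · have hlt : run + 1 ≤ 2 := by omega
        have : pvGoA (c :: rest) run = pvGoA rest (run + 1) := by
          simp [pvGoA, hv]; omega
        rw [this, ih (run + 1) hlt]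
        have : List.replicate run true ++ (c :: rest).map (fun c => !pvVowel c)
             = List.replicate (run + 1) true ++ rest.map (fun c => !pvVowel c) := by
          simp [hv, List.replicate_succ']
        rw [this]

-- ===== VERDICT (by name: the statement is the Claim_ definition above) =====
theorem is_pronounceable_py_spec : Claim_equal_is_pronounceable_py := by
  intro name _
  unfold Spec_is_pronounceable_py is_pronounceable_py is_pronounceable_py_alt
  simpa using pvGoA_eq_pvGoB (PySem.Chars.lower name.toList) 0 (by omega)
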